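-- pv_equiv track=rewrite | github.com/SKNETWORKS-FAMILY-AICAMP/SKN12-FINAL-2TEAM | base_server/template/base/template_service.py | _match_ip_pattern
-- ===== SOURCE A (Python) =====
-- def _match_ip_pattern(ip_address: str, pattern: str) -> bool:
--     """IP 패턴 매칭 (와일드카드 지원)"""
--     if pattern == ip_address:
--         return True
--
--     # 와일드카드 패턴 처리
--     if '*' in pattern:
--         pattern_parts = pattern.split('.')
--         ip_parts = ip_address.split('.')
--
--         if len(pattern_parts) != len(ip_parts):
--             return False
--
--         for p_part, ip_part in zip(pattern_parts, ip_parts):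
--             if p_part != '*' and p_part != ip_part:
--                 return False
--         return True
--
--     return False
-- ===== SOURCE B (Python) =====
-- def _match_ip_pattern(ip_address: str, pattern: str) -> bool:
--     """IP pattern matching (wildcard support) - recursive part-by-part matcher."""
--     if '*' not in pattern:
--         return pattern == ip_address
--     return _parts_match(pattern.split('.'), ip_address.split('.'))
--
--
-- def _parts_match(pattern_parts, ip_parts):
--     if not pattern_parts and not ip_parts:
--         return True
--     if not pattern_parts or not ip_parts:
--         return False
--     head_ok = pattern_parts[0] == '*' or pattern_parts[0] == ip_parts[0]
--     return head_ok and _parts_match(pattern_parts[1:], ip_parts[1:])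
-- ===== Notes on version B (the rewrite author's own statement) =====
-- stated objective: simpler
-- what changed: Replaces A's early exact-equality return plus length check plus zip loop by a single guard ('*' in pattern, else plain string equality) and a structural recursion over the two part lists that handles length mismatch and part comparison in one place; the exact-match shortcut is subsumed because equal strings split into equal parts.
import Mathlib
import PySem

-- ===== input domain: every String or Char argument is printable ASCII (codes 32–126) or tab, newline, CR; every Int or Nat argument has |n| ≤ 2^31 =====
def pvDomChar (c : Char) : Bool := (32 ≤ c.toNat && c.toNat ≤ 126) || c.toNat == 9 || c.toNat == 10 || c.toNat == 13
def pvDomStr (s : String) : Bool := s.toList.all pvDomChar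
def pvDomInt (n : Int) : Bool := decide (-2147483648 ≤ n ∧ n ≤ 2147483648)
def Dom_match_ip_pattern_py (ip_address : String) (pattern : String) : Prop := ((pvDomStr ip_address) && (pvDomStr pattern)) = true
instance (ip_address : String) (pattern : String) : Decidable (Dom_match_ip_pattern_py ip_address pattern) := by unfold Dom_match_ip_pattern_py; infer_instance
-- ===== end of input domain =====

-- B replaces A's exact-equality shortcut + length check + zip loop by one guard and a single
-- structural recursion over the two part lists (objective: simpler).

-- ===== PORT A =====
def match_ip_pattern_py (ip_address : String) (pattern : String) : Bool :=
  if pattern == ip_address then true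
  else if PySem.Str.isIn "*" pattern then
    let pattern_parts := PySem.Chars.splitOn pattern.toList ['.']
    let ip_parts := PySem.Chars.splitOn ip_address.toList ['.']
    if pattern_parts.length != ip_parts.length then false
    else (pattern_parts.zip ip_parts).all (fun x => x.1 == ['*'] || x.1 == x.2)
  else false

-- ===== PORT B =====
def pvPartsMatch : List (List Char) → List (List Char) → Bool
  | [], [] => true
  | p :: ps, q :: qs => (p == ['*'] || p == q) && pvPartsMatch ps qs
  | _, _ => false

def match_ip_pattern_py_alt (ip_address : String) (pattern : String) : Bool :=
  if !(PySem.Str.isIn "*" pattern) then pattern == ip_address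
  else pvPartsMatch (PySem.Chars.splitOn pattern.toList ['.'])
                    (PySem.Chars.splitOn ip_address.toList ['.'])

-- ===== PRECONDITION & SPEC =====
def Spec_match_ip_pattern_py (ip_address : String) (pattern : String) (out : Bool) : Prop := out = match_ip_pattern_py_alt ip_address pattern
instance (ip_address : String) (pattern : String) (out : Bool) : Decidable (Spec_match_ip_pattern_py ip_address pattern out) := by unfold Spec_match_ip_pattern_py; infer_instance

-- ===== CLAIM (what is proved, stated in full; the proofs are below) =====
def Claim_equal_match_ip_pattern_py : Prop := ∀ (ip_address : String) (pattern : String), Dom_match_ip_pattern_py ip_address pattern → Spec_match_ip_pattern_py ip_address pattern (match_ip_pattern_py ip_address pattern)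

-- ===== LEMMAS AND PROOFS =====

-- B's recursion equals A's "equal lengths AND every zipped pair matches".
theorem pvPartsMatch_eq (ps qs : List (List Char)) :
    pvPartsMatch ps qs =
      ((ps.length == qs.length) && (ps.zip qs).all (fun x => x.1 == ['*'] || x.1 == x.2)) := by
  induction ps generalizing qs with
  | nil => cases qs <;> simp [pvPartsMatch]
  | cons p ps ih =>
    cases qs with
    | nil => simp [pvPartsMatch]
    | cons q qs =>
      simp [pvPartsMatch, ih qs, Bool.and_left_comm]

theorem pvPartsMatch_refl (l : List (List Char)) : pvPartsMatch l l = true := by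
  induction l with
  | nil => rfl
  | cons p ps ih => simp [pvPartsMatch, ih]

-- ===== VERDICT (by name: the statement is the Claim_ definition above) =====
theorem match_ip_pattern_py_spec : Claim_equal_match_ip_pattern_py := by
  intro ip pattern _
  unfold Spec_match_ip_pattern_py match_ip_pattern_py match_ip_pattern_py_alt
  by_cases hstar : PySem.Chars.isIn ['*'] pattern.toList = true
  · by_cases heq : pattern = ip
    · subst heq
      simp [hstar, pvPartsMatch_refl]
    · have hbe : (pattern == ip) = false := by simp [heq]
      have hs : PySem.Str.isIn "*" pattern = true := by simpa using hstar
      rw [pvPartsMatch_eq]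
      rcases h : (PySem.Chars.splitOn pattern.toList ['.']).length ==
          (PySem.Chars.splitOn ip.toList ['.']).length with _ | _ <;>
        simp only [hbe, hs, h, bne, Bool.not_true, Bool.not_false, Bool.false_eq_true,
          if_false, if_true, Bool.true_and, Bool.false_and]
  · have hstar' : PySem.Chars.isIn ['*'] pattern.toList = false := by
      simpa using hstar
    by_cases heq : pattern = ip
    · subst heq; simp [hstar']
    · have hbe : (pattern == ip) = false := by simp [heq]
      simp [hbe, hstar']
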